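-- pv_equiv track=rewrite | github.com/djuares/tp1-TDA | problema2/problema_2.py | algoritmo_greedy
-- ===== SOURCE A (Python) =====
-- def suma_positivos_final(arr):
--     resultados = {}
--     suma = 0
--
--     for i in range(len(arr)):
--         resultados[i] = 0
--         suma = 0
--         max = float("-inf")
--         for j in range(i + 1, len(arr)):
--             suma += arr[j]
--             if suma > max:
--                 max = suma
--         resultados[i] = max
--
--     resultados[len(arr)-1] = 0
--     return resultados
--
-- def algoritmo_greedy(arr):
--     pos = suma_positivos_final(arr)
--     suma_int = 0
--     elems_int = 0
--     cant_ints = 0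
--
--     for i, x in enumerate(arr):
--         suma_int += x
--         elems_int += 1
--
--         # caso 1: intervalo sin sentido (demasiado chico y no se puede extender)
--         if elems_int <= 1 and suma_int + pos[i] <= 0:
--             suma_int = 0
--             elems_int = 0
--             continue
--
--         # caso 2: todavía conviene seguir extendiendo (hay chance mas adelante por pos)
--         if suma_int + pos[i] > 0:
--             continue
--
--         # caso 3: hay que cerrar el intervalo
--         cant_ints += 1
--         suma_int = 0
--         elems_int = 0
--
--     # Último intervalo válido
--     if suma_int > 0 and elems_int > 1:
--         cant_ints += 1
--
--     return cant_ints
-- ===== SOURCE B (Python) =====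
-- def algoritmo_greedy(arr):
--     # One backward pass: pos[i] = best sum of a non-empty prefix of arr[i+1:]
--     # (0 when that slice is empty), then one forward pass closing intervals.
--     pos = []
--     g = 0
--     for x in reversed(arr):
--         pos.append(g)
--         g = x + (g if g > 0 else 0)
--     pos.reverse()
--
--     cant_ints = 0
--     suma_int = 0
--     elems_int = 0
--     for x, p in zip(arr, pos):
--         suma_int += x
--         elems_int += 1
--         if suma_int + p <= 0:
--             if elems_int > 1:
--                 cant_ints += 1
--             suma_int = 0
--             elems_int = 0
--     if suma_int > 0 and elems_int > 1:
--         cant_ints += 1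
--     return cant_ints
-- ===== Notes on version B (the rewrite author's own statement) =====
-- stated objective: faster
-- what changed: Replaces the O(n^2) dict of best suffix-prefix sums (inner rescan per index) with a single backward Kadane-style pass g = x + max(0, g) producing the same pos array, and folds the interval-closing state machine (with the three branches collapsed to two) in one forward pass.
import Mathlib
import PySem

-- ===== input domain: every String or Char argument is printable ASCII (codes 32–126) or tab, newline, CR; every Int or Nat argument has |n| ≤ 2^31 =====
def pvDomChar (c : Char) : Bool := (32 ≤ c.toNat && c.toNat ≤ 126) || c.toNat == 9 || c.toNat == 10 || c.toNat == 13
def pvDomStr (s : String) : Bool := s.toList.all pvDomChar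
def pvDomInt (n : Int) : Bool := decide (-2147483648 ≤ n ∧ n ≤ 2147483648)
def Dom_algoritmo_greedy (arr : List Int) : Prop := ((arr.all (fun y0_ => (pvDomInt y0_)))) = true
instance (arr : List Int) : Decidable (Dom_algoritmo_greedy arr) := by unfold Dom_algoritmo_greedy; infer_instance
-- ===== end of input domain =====

-- B replaces A's quadratic per-index rescan of best suffix-prefix sums by one
-- backward pass (g = x + max(0, g)) and folds the same interval state machine
-- forward once; proved to return A's exact value on every input.

-- ===== PORT A =====
-- inner loop body of suma_positivos_final: state (suma, max); 'none' is the
-- initial float('-inf') that no int has been compared against yet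
def pvInnerStep (p : Int × Option Int) (v : Int) : Int × Option Int :=
  let suma := p.1 + v
  match p.2 with
  | none => (suma, some suma)
  | some m => (suma, if suma > m then some suma else some m)

-- the inner 'for j in range(i+1, len(arr))' loop, returning the final 'max'
def pvInnerA (arr : List Int) (i : Int) : Option Int :=
  ((PySem.List.pyRange (i + 1) (PySem.List.len arr) 1).foldl
    (fun p j => pvInnerStep p (PySem.List.pyGet? arr j |>.getD 0)) (0, none)).2

def suma_positivos_final (arr : List Int) : PySem.Dict Int (Option Int) :=
  let n := PySem.List.len arr
  let resultados := (PySem.List.pyRange 0 n 1).foldl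
    (fun d i => ((d.insert i (some 0)).insert i (pvInnerA arr i))) PySem.Dict.empty
  resultados.insert (n - 1) (some 0)

-- 'suma + pos[i] <= 0' / '> 0' where pos[i] may be float('-inf') (= none)
def pvLeZeroA (s : Int) (p : Option Int) : Bool :=
  match p with | none => true | some v => decide (s + v ≤ 0)
def pvGtZeroA (s : Int) (p : Option Int) : Bool :=
  match p with | none => false | some v => decide (0 < s + v)

def pvStepA (pos : PySem.Dict Int (Option Int)) (st : Int × Int × Int) (ix : Int × Int) : Int × Int × Int :=
  let suma := st.1 + ix.2
  let elems := st.2.1 + 1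
  let cant := st.2.2
  let p := pos.getD ix.1 none
  if elems ≤ 1 ∧ pvLeZeroA suma p = true then (0, 0, cant)
  else if pvGtZeroA suma p = true then (suma, elems, cant)
  else (0, 0, cant + 1)

def algoritmo_greedy (arr : List Int) : Int :=
  let pos := suma_positivos_final arr
  let st := (PySem.List.enumerate arr 0).foldl (pvStepA pos) (0, 0, 0)
  if st.1 > 0 ∧ st.2.1 > 1 then st.2.2 + 1 else st.2.2

-- ===== PORT B =====
def pvStepB (st : Int × Int × Int) (xp : Int × Int) : Int × Int × Int :=
  let suma := st.1 + xp.1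
  let elems := st.2.1 + 1
  if suma + xp.2 ≤ 0 then (0, 0, if elems > 1 then st.2.2 + 1 else st.2.2)
  else (suma, elems, st.2.2)

def algoritmo_greedy_alt (arr : List Int) : Int :=
  let gp := arr.reverse.foldl (fun (s : Int × List Int) x =>
      (x + (if s.1 > 0 then s.1 else 0), s.2 ++ [s.1])) (0, [])
  let pos := gp.2.reverse
  let st := (arr.zip pos).foldl pvStepB (0, 0, 0)
  if st.1 > 0 ∧ st.2.1 > 1 then st.2.2 + 1 else st.2.2

-- ===== PRECONDITION & SPEC =====
def Spec_algoritmo_greedy (arr : List Int) (out : Int) : Prop := out = algoritmo_greedy_alt arr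
instance (arr : List Int) (out : Int) : Decidable (Spec_algoritmo_greedy arr out) := by unfold Spec_algoritmo_greedy; infer_instance

-- ===== CLAIM (what is proved, stated in full; the proofs are below) =====
def Claim_equal_algoritmo_greedy : Prop := ∀ (arr : List Int), Dom_algoritmo_greedy arr → Spec_algoritmo_greedy arr (algoritmo_greedy arr)

-- ===== LEMMAS AND PROOFS =====

-- best sum of a non-empty prefix of l (0 for l = []): the value both pos arrays hold
def fB : List Int → Int
  | [] => 0
  | x :: t => x + max 0 (fB t)

-- common shape of both main loops: the pos value at a position is fB of the rest
def loopSpec : List Int → Int × Int × Int → Int × Int × Int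
  | [], st => st
  | x :: t, st =>
      let suma := st.1 + x
      let elems := st.2.1 + 1
      loopSpec t (if suma + fB t ≤ 0 then (0, 0, if elems > 1 then st.2.2 + 1 else st.2.2)
                  else (suma, elems, st.2.2))

theorem inner_fold_eq (l : List Int) : ∀ (s : Int) (m : Option Int), l ≠ [] →
    (l.foldl pvInnerStep (s, m)).2
      = some (match m with | none => s + fB l | some a => max a (s + fB l)) := by
  induction l with
  | nil => intro _ _ h; exact absurd rfl h
  | cons x t ih =>
    intro s m _
    by_cases ht : t = []
    · subst ht
      cases m with
      | none => simp [pvInnerStep, fB]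
      | some a =>
        simp only [List.foldl, pvInnerStep, fB]
        split_ifs <;> simp <;> omega
    · have step2 : pvInnerStep (s, m) x
          = (s + x, some (match m with | none => s + x | some a => max a (s + x))) := by
        cases m with
        | none => simp [pvInnerStep]
        | some a =>
          simp only [pvInnerStep]
          split_ifs <;> simp <;> omega
      simp only [List.foldl, step2]
      rw [ih (s + x) _ ht]
      cases m with
      | none => simp [fB]; omega
      | some a => simp [fB]; omega

theorem pvInnerA_eq (arr : List Int) (i : Int) (h0 : 0 ≤ i) (h1 : i < (arr.length : Int) - 1) :
    pvInnerA arr i = some (fB (arr.drop (i + 1).toNat)) := by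
  unfold pvInnerA
  have hgetd : ∀ (p : Int × Option Int) (j : Int),
      pvInnerStep p ((PySem.List.pyGet? arr j).getD 0) = pvInnerStep p (PySem.List.pyGetD arr j 0) := by
    intro p j; rfl
  simp only [hgetd]
  rw [PySem.List.foldl_pyRange_pyGetD arr 0 pvInnerStep (0, none) (by omega)]
  have hne : arr.drop (i + 1).toNat ≠ [] := by
    intro h
    have := List.drop_eq_nil_iff.mp h
    omega
  rw [inner_fold_eq _ 0 none hne]
  simp

theorem dict_fold_getD (arr : List Int) (m : Nat) (i : Int) :
    (((PySem.List.pyRange 0 (m : Int) 1).foldl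
        (fun d k => ((d.insert k (some (0 : Int))).insert k (pvInnerA arr k))) PySem.Dict.empty).getD i none)
      = if 0 ≤ i ∧ i < (m : Int) then pvInnerA arr i else none := by
  induction m with
  | zero =>
    rw [show PySem.List.pyRange 0 ((0:Nat):Int) 1 = [] from rfl]
    simp only [List.foldl]
    rw [if_neg (by omega)]
    simp [PySem.Dict.getD_empty]
  | succ m ih =>
    have hsplit : PySem.List.pyRange 0 ((m : Int) + 1) 1
        = PySem.List.pyRange 0 (m : Int) 1 ++ [(m : Int)] := by
      exact PySem.List.pyRange_one_succ_right (a := 0) (b := (m : Int)) (by omega)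
    push_cast
    rw [hsplit, List.foldl_append]
    simp only [List.foldl]
    rw [PySem.Dict.getD_insert, PySem.Dict.getD_insert]
    split_ifs with h1 h2 h2
    · subst h1; simp
    · omega
    · rw [ih]; simp only [if_pos (by omega : 0 ≤ i ∧ i < (m : Int))]
    · rw [ih]
      by_cases h3 : 0 ≤ i ∧ i < (m : Int)
      · omega
      · simp [h3]

theorem pos_getD (arr : List Int) (i : Int) (h0 : 0 ≤ i) (h1 : i < (arr.length : Int)) :
    (suma_positivos_final arr).getD i none = some (fB (arr.drop (i + 1).toNat)) := by
  unfold suma_positivos_final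
  simp only [PySem.List.len_eq]
  rw [PySem.Dict.getD_insert]
  split_ifs with hlast
  · have : (i + 1).toNat = arr.length := by omega
    rw [this, List.drop_length]
    rfl
  · have hlt : i < (arr.length : Int) - 1 := by omega
    have := dict_fold_getD arr arr.length i
    push_cast at this
    rw [this, if_pos ⟨h0, by omega⟩]
    exact pvInnerA_eq arr i h0 hlt

theorem loopA_eq (arr : List Int) : ∀ (t : List Int) (k : Nat) (st : Int × Int × Int),
    t = arr.drop k →
    (PySem.List.enumerate t (k : Int)).foldl (pvStepA (suma_positivos_final arr)) st = loopSpec t st := by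
  intro t
  induction t with
  | nil => intro k st _; simp [PySem.List.enumerate_nil, loopSpec]
  | cons x tt ih =>
    intro k st hdrop
    have hk : k < arr.length := by
      by_contra h
      rw [List.drop_eq_nil_iff.mpr (by omega)] at hdrop
      exact List.cons_ne_nil x tt hdrop
    have htt : tt = arr.drop (k + 1) := by
      have := congrArg List.tail hdrop
      simpa [List.tail_drop] using this
    have hpos : (suma_positivos_final arr).getD (k : Int) none
        = some (fB tt) := by
      rw [pos_getD arr (k : Int) (by omega) (by exact_mod_cast hk)]
      have : ((k : Int) + 1).toNat = k + 1 := by omega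
      rw [this, ← htt]
    rw [PySem.List.enumerate_cons]
    simp only [List.foldl]
    have hstep : pvStepA (suma_positivos_final arr) st ((k : Int), x)
        = (if st.1 + x + fB tt ≤ 0
            then (0, 0, if st.2.1 + 1 > 1 then st.2.2 + 1 else st.2.2)
            else (st.1 + x, st.2.1 + 1, st.2.2)) := by
      simp only [pvStepA, hpos, pvLeZeroA, pvGtZeroA, decide_eq_true_eq]
      split_ifs <;> first | rfl | (exfalso; omega)
    rw [hstep]
    have harg : (k : Int) + 1 = ((k + 1 : Nat) : Int) := by push_cast; ring
    rw [harg, ih (k + 1) _ htt]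
    simp only [loopSpec]

-- B's backward pass: foldl over the reversal computes (fB arr, pvP arr)
def pvP : List Int → List Int
  | [] => []
  | _ :: t => pvP t ++ [fB t]

theorem scanB_eq (arr : List Int) :
    arr.reverse.foldl (fun (s : Int × List Int) x =>
      (x + (if s.1 > 0 then s.1 else 0), s.2 ++ [s.1])) (0, [])
    = (fB arr, pvP arr) := by
  rw [List.foldl_reverse]
  induction arr with
  | nil => rfl
  | cons x t ih =>
    simp only [List.foldr, ih]
    have hmax : (if fB t > 0 then fB t else 0) = max 0 (fB t) := by split_ifs <;> omega
    simp only [hmax, fB, pvP]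

-- the reversed pos list pairs each element with fB of its tail
def pvQ : List Int → List Int
  | [] => []
  | _ :: t => fB t :: pvQ t

theorem pvP_rev_eq (arr : List Int) : (pvP arr).reverse = pvQ arr := by
  induction arr with
  | nil => rfl
  | cons x t ih => simp [pvP, pvQ, ih]

theorem loopB_eq (t : List Int) : ∀ (st : Int × Int × Int),
    (t.zip (pvQ t)).foldl pvStepB st = loopSpec t st := by
  induction t with
  | nil => intro st; rfl
  | cons x tt ih =>
    intro st
    simp only [pvQ, List.zip_cons_cons, List.foldl, loopSpec, pvStepB]
    rw [ih]

-- ===== VERDICT (by name: the statement is the Claim_ definition above) =====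
theorem algoritmo_greedy_spec : Claim_equal_algoritmo_greedy := by
  intro arr _
  unfold Spec_algoritmo_greedy algoritmo_greedy algoritmo_greedy_alt
  simp only [scanB_eq, pvP_rev_eq, loopB_eq]
  have hA := loopA_eq arr arr 0 (0, 0, 0) (by simp)
  simp only [Nat.cast_zero] at hA
  rw [hA]
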